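-- pv_equiv track=rewrite | github.com/Man0nGA/TetrisLike_Game | functions.py | row_state
-- ===== SOURCE A (Python) =====
-- def row_state(grid, i):
--
--     L = []
--     for y in range(len(grid[i])):
--         full_line = False
--         if grid[i][y] == 2 or grid[i][y] == 0:
--             full_line = True
--         L.append(full_line)
--     if False in L:
--         full_line = False
--     else:
--         full_line = True
--     return full_line
-- ===== SOURCE B (Python) =====
-- def row_state(grid, i):
--     return set(grid[i]) <= {0, 2}
-- ===== Notes on version B (the rewrite author's own statement) =====
-- stated objective: idiomatic
-- what changed: Replaces the build-a-boolean-list-then-scan-for-False loop with a one-line subset test of the row's distinct values against {0, 2}.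
import Mathlib
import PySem

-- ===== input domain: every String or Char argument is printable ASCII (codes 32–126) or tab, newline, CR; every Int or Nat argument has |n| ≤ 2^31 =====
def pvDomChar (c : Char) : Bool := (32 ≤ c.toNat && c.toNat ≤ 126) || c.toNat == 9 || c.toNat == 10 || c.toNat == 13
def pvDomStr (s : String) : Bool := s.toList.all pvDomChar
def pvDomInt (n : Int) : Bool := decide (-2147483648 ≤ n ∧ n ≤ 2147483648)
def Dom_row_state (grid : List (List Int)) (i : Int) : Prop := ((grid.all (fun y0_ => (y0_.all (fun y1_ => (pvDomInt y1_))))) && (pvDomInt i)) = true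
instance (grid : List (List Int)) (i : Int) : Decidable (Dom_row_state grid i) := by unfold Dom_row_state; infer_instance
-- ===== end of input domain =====

-- B replaces A's boolean-list build-and-scan with a subset test of the row's value set against {0, 2} (idiomatic; same return values).

-- ===== PORT A =====
def row_state (grid : List (List Int)) (i : Int) : Bool :=
  match PySem.List.pyGet? grid i with  -- none = IndexError, excluded by Pre_
  | none => false
  | some row =>
    let L := (PySem.List.pyRange 0 (row.length : Int) 1).foldl
      (fun L y =>
      let full_line := false
      let full_line := if PySem.List.pyGetD row y 0 = 2 ∨ PySem.List.pyGetD row y 0 = 0 then true else full_line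
      L ++ [full_line]) []
    if false ∈ L then false else true

-- ===== PORT B =====
def row_state_alt (grid : List (List Int)) (i : Int) : Bool :=
  match PySem.List.pyGet? grid i with  -- none = IndexError, excluded by Pre_
  | none => false
  | some row => PySem.Set.issubset (PySem.Set.ofList row) [0, 2]

-- ===== PRECONDITION & SPEC =====
-- Pre_ excludes exactly the indices i on which grid[i] raises IndexError in both A and B.
def Pre_row_state (grid : List (List Int)) (i : Int) : Prop := PySem.Raise.InRange grid.length i
instance (grid : List (List Int)) (i : Int) : Decidable (Pre_row_state grid i) := by unfold Pre_row_state; infer_instance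
def pvWitness_row_state : List (List Int) × Int := ([[0, 2, 1]], 0)
def Spec_row_state (grid : List (List Int)) (i : Int) (out : Bool) : Prop := out = row_state_alt grid i
instance (grid : List (List Int)) (i : Int) (out : Bool) : Decidable (Spec_row_state grid i out) := by unfold Spec_row_state; infer_instance

-- ===== CLAIM (what is proved, stated in full; the proofs are below) =====
def Claim_equal_row_state : Prop := ∀ (grid : List (List Int)) (i : Int), Dom_row_state grid i → Pre_row_state grid i → Spec_row_state grid i (row_state grid i)

-- ===== LEMMAS AND PROOFS =====

lemma row_state_A_eq_all (row : List Int) :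
    (if false ∈ row.map (fun v => if v = 2 ∨ v = 0 then true else false) then false else true)
      = row.all (fun v => v = 2 || v = 0) := by
  induction row with
  | nil => simp
  | cons x xs ih =>
    by_cases hx : x = 2 ∨ x = 0 <;> simp_all

lemma row_state_B_eq_all (row : List Int) :
    PySem.Set.issubset (PySem.Set.ofList row) [0, 2] = row.all (fun v => v = 2 || v = 0) := by
  rw [Bool.eq_iff_iff]
  simp only [PySem.Set.issubset, List.all_eq_true, PySem.Set.mem_ofList, decide_eq_true_eq,
    Bool.or_eq_true]
  constructor <;> intro h v hv <;> have hh := h v hv <;>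
    simp only [PySem.Set.contains, List.contains, List.elem_eq_mem, List.mem_cons,
      List.not_mem_nil, or_false, decide_eq_true_eq] at hh ⊢ <;> tauto

-- ===== VERDICT (by name: the statement is the Claim_ definition above) =====
theorem row_state_spec : Claim_equal_row_state := by
  intro grid i _ hpre
  unfold Spec_row_state row_state row_state_alt
  obtain ⟨row, hrow⟩ : ∃ row, PySem.List.pyGet? grid i = some row := by
    rcases h : PySem.List.pyGet? grid i with _ | row
    · exact absurd ((PySem.List.pyGet?_eq_none_iff grid i).mp h) (not_not.mpr hpre)
    · exact ⟨row, rfl⟩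
  rw [hrow]
  show (if false ∈ (PySem.List.pyRange 0 (row.length : Int) 1).foldl
      (fun L y => L ++ [if PySem.List.pyGetD row y 0 = 2 ∨ PySem.List.pyGetD row y 0 = 0 then true else false]) []
    then false else true) = PySem.Set.issubset (PySem.Set.ofList row) [0, 2]
  rw [PySem.List.foldl_pyRange_zero_pyGetD' row 0
      (fun L v => L ++ [if v = 2 ∨ v = 0 then true else false]) []]
  rw [PySem.List.foldl_append_singleton_eq_map]
  simp only [List.nil_append]
  exact (row_state_A_eq_all row).trans (row_state_B_eq_all row).symm
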